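-- pv_equiv track=rewrite | github.com/phossystems/Reverse | Reverse.py | sortSimplex2D
-- ===== SOURCE A (Python) =====
-- def sortSimplex2D(x):
--     """Orders a list of line segments to align end to end
--
--     Parameters
--     ----------
--     x : List of shape (-1, 2)
--         -1 number of line segments, [startPointIndex, endPointIndex]
--
--     Returns
--     -------
--     list of shape (-1, 2)
--     """
--     # Go through elements one by one
--     for i in range(len(x)-1):
--         # Look for the end index of the current elements in the remaining elements
--         for j in range(i+1, len(x)):
--             # If the end index is found as the start index of another element move it after the cureent element
--             if x[j][0] == x[i][1]:
--                 x.insert(i+1, x.pop(j))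
--                 break
--             # If the end index is found as the end index of another element flip it and move it after the cureent element
--             if x[j][1] == x[i][1]:
--                 x[j].reverse()
--                 x.insert(i+1, x.pop(j))
--                 break
--     return x
-- ===== SOURCE B (Python) =====
-- def sortSimplex2D(x):
--     """Orders a list of line segments to align end to end.
--
--     Indexes segments by their start/end values in two dicts so each chain
--     step picks the smallest-index matching segment by lookup instead of a
--     linear scan of the remainder. Does not mutate x (the original mutates
--     in place; the return value is the same).
--     """
--     n = len(x)
--     if n <= 1:
--         return x
--     smap = {}
--     emap = {}
--     for idx, seg in enumerate(x):
--         smap.setdefault(seg[0], []).append(idx)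
--         emap.setdefault(seg[1], []).append(idx)
--     out = []
--     alive = [True] * n
--     p = 0  # all indices < p are consumed
--
--     def consume(j, oriented):
--         alive[j] = False
--         smap[x[j][0]].remove(j)
--         emap[x[j][1]].remove(j)
--         out.append(oriented)
--         return oriented[1]
--
--     cur = consume(0, x[0])
--     while len(out) < n:
--         cs = smap.get(cur)
--         ce = emap.get(cur)
--         js = cs[0] if cs else None
--         je = ce[0] if ce else None
--         if js is not None and (je is None or js <= je):
--             cur = consume(js, x[js])
--         elif je is not None:
--             cur = consume(je, list(reversed(x[je])))
--         else:
--             while not alive[p]: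
--                 p += 1
--             cur = consume(p, x[p])
--     return out
-- ===== Notes on version B (the rewrite author's own statement) =====
-- stated objective: alternative
-- what changed: B indexes segments once in two dicts keyed by start/end value and picks each chain successor as the smallest remaining matching index by dict lookup, instead of A's repeated linear scan with in-place insert/pop splicing of the list.
-- outside the precondition, e.g. on sortSimplex2D([[1, 2], [2]]): A returns [[1, 2], [2]], B raises IndexError
import Mathlib
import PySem

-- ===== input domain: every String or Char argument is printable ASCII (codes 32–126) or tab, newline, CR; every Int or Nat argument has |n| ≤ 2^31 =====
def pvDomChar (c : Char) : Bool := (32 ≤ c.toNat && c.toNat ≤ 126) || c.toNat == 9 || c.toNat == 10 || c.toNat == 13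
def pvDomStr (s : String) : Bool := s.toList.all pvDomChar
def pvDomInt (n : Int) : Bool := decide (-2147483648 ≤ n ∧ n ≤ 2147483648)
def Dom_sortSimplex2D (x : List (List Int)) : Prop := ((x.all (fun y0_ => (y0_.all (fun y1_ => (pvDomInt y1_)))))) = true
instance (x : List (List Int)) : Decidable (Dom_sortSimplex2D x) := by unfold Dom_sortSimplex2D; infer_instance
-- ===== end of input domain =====

-- B replaces A's scan-and-splice over the mutable list with two dicts indexing segments
-- by start/end value (objective: alternative). A mutates its argument in place; the
-- equivalence proved here is about the RETURN value only (B does not mutate).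


-- ===== PORT A =====
-- inner loop 'for j in range(i+1, len(x))': first matching j is moved to position i+1
def pvScanA (xs : List (List Int)) (i j : Nat) : List (List Int) :=
  if h : j < xs.length then
    let xi := xs.getD i []
    let xj := xs.getD j []
    if xj.getD 0 0 = xi.getD 1 0 then
      -- x.insert(i+1, x.pop(j))
      (xs.eraseIdx j).insertIdx (i+1) xj
    else if xj.getD 1 0 = xi.getD 1 0 then
      -- x[j].reverse(); x.insert(i+1, x.pop(j))
      (xs.eraseIdx j).insertIdx (i+1) xj.reverse
    else pvScanA xs i (j+1)
  else xs
termination_by xs.length - j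

def sortSimplex2D (x : List (List Int)) : List (List Int) :=
  (List.range (x.length - 1)).foldl (fun xs i => pvScanA xs i (i+1)) x

-- ===== PORT B =====
def pvKey0 (s : List Int) : Int := s.getD 0 0
def pvKey1 (s : List Int) : Int := s.getD 1 0

-- smap.setdefault(seg[0], []).append(idx); emap.setdefault(seg[1], []).append(idx)
def pvBuild (x : List (List Int)) :
    PySem.Dict Int (List Nat) × PySem.Dict Int (List Nat) :=
  x.zipIdx.foldl
    (fun ms p => (ms.1.modify (pvKey0 p.1) [] (· ++ [p.2]),
                  ms.2.modify (pvKey1 p.1) [] (· ++ [p.2])))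
    (PySem.Dict.empty, PySem.Dict.empty)

-- lst.remove(j) (j is present whenever called)
def pvRemoveIdx (l : List Nat) (j : Nat) : List Nat := (PySem.List.remove? l j).getD l

-- smap[x[j][0]].remove(j); emap[x[j][1]].remove(j)
def pvConsume (x : List (List Int)) (j : Nat)
    (smap emap : PySem.Dict Int (List Nat)) :
    PySem.Dict Int (List Nat) × PySem.Dict Int (List Nat) :=
  let s := x.getD j []
  (smap.modify (pvKey0 s) [] (pvRemoveIdx · j),
   emap.modify (pvKey1 s) [] (pvRemoveIdx · j))

-- while not alive[p]: p += 1  (bounded by the list length; never exhausted when called)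
def pvFindAlive (alive : List Bool) (p : Nat) : Nat :=
  if h : p < alive.length then
    if alive.getD p false then p else pvFindAlive alive (p+1)
  else p
termination_by alive.length - p

-- while len(out) < n: pick smallest matching index from the two maps, else next alive
def pvLoopB (x : List (List Int)) :
    Nat → PySem.Dict Int (List Nat) → PySem.Dict Int (List Nat) →
    List Bool → Nat → Int → List (List Int) → List (List Int)
  | 0, _, _, _, _, _, out => out
  | fuel+1, smap, emap, alive, p, cur, out =>
    match smap.getD cur [], emap.getD cur [] with
    | [], [] =>
      let p' := pvFindAlive alive p
      let o := x.getD p' []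
      let ms := pvConsume x p' smap emap
      pvLoopB x fuel ms.1 ms.2 (alive.set p' false) p' (o.getD 1 0) (out ++ [o])
    | js :: _, [] =>
      let o := x.getD js []
      let ms := pvConsume x js smap emap
      pvLoopB x fuel ms.1 ms.2 (alive.set js false) p (o.getD 1 0) (out ++ [o])
    | [], je :: _ =>
      let o := (x.getD je []).reverse
      let ms := pvConsume x je smap emap
      pvLoopB x fuel ms.1 ms.2 (alive.set je false) p (o.getD 1 0) (out ++ [o])
    | js :: _, je :: _ =>
      if js ≤ je then
        let o := x.getD js []
        let ms := pvConsume x js smap emap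
        pvLoopB x fuel ms.1 ms.2 (alive.set js false) p (o.getD 1 0) (out ++ [o])
      else
        let o := (x.getD je []).reverse
        let ms := pvConsume x je smap emap
        pvLoopB x fuel ms.1 ms.2 (alive.set je false) p (o.getD 1 0) (out ++ [o])

def sortSimplex2D_alt (x : List (List Int)) : List (List Int) :=
  if x.length ≤ 1 then x
  else
    let ms := pvBuild x
    let s0 := x.getD 0 []
    let ms' := pvConsume x 0 ms.1 ms.2
    pvLoopB x (x.length - 1) ms'.1 ms'.2
      ((List.replicate x.length true).set 0 false) 0 (s0.getD 1 0) [s0]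

-- ===== PRECONDITION & SPEC =====
-- Pre_ excludes inputs (when len(x) ≥ 2) containing an inner list of length < 2: there the
-- Python A usually raises IndexError, and on the rare such inputs where A still returns
-- (the short segment is moved before its second entry is read) our B raises instead.
def Pre_sortSimplex2D (x : List (List Int)) : Prop :=
  x.length ≤ 1 ∨ ∀ s ∈ x, 2 ≤ s.length
instance (x : List (List Int)) : Decidable (Pre_sortSimplex2D x) := by
  unfold Pre_sortSimplex2D; infer_instance

def pvWitness_sortSimplex2D : List (List Int) := [[1, 2], [3, 4], [2, 3]]

def Spec_sortSimplex2D (x : List (List Int)) (out : List (List Int)) : Prop := out = sortSimplex2D_alt x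
instance (x : List (List Int)) (out : List (List Int)) : Decidable (Spec_sortSimplex2D x out) := by unfold Spec_sortSimplex2D; infer_instance

-- ===== CLAIM (what is proved, stated in full; the proofs are below) =====
def Claim_equal_sortSimplex2D : Prop := ∀ (x : List (List Int)), Dom_sortSimplex2D x → Pre_sortSimplex2D x → Spec_sortSimplex2D x (sortSimplex2D x)

-- ===== LEMMAS AND PROOFS =====

-- f maps a remaining original index to its (never-yet-reversed) segment
def pvF (x : List (List Int)) (r : Nat) : List Int := x.getD r []

-- reference greedy step: first remaining index whose start (preferred) or end equals cur
def gFind (x : List (List Int)) (cur : Int) : List Nat → Option (List Int × List Nat)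
  | [] => none
  | r :: rs =>
    let s := pvF x r
    if s.getD 0 0 = cur then some (s, rs)
    else if s.getD 1 0 = cur then some (s.reverse, rs)
    else (gFind x cur rs).map (fun q => (q.1, r :: q.2))

def gRun (x : List (List Int)) : Nat → Int → List Nat → List (List Int)
  | 0, _, _ => []
  | fuel+1, cur, R =>
    match gFind x cur R with
    | some q => q.1 :: gRun x fuel (q.1.getD 1 0) q.2
    | none =>
      match R with
      | [] => []
      | r :: rs => pvF x r :: gRun x fuel ((pvF x r).getD 1 0) rs

def gTop (x : List (List Int)) : List (List Int) :=
  if x.length ≤ 1 then x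
  else pvF x 0 :: gRun x (x.length - 1) ((pvF x 0).getD 1 0) (List.range' 1 (x.length - 1))

-- helper list lemmas specific to the decomposition used below
theorem pv_getD_append_right (C L : List (List Int)) (k : Nat) :
    (C ++ L).getD (C.length + k) [] = L.getD k [] := by
  simp [List.getD, List.getElem?_append_right]

theorem pv_getD_append_left (C L : List (List Int)) (k : Nat) (h : k < C.length) :
    (C ++ L).getD k [] = C.getD k [] := by
  simp [List.getD, List.getElem?_append_left h]

theorem pv_insertIdx_mid (C M : List (List Int)) (v : List Int) :
    (C ++ M).insertIdx C.length v = C ++ v :: M := by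
  induction C with
  | nil => simp
  | cons a t ih => simp [List.insertIdx_succ_cons, ih]

theorem pv_eraseIdx_mid (C S : List (List Int)) (v : List Int) (M : List (List Int)) :
    (C ++ (S ++ v :: M)).eraseIdx (C.length + S.length) = C ++ (S ++ M) := by
  rw [List.eraseIdx_append_of_length_le (by simp)]
  congr 1
  rw [List.eraseIdx_append_of_length_le (by omega)]
  congr 1
  simp

theorem gFind_length (x : List (List Int)) (cur : Int) :
    ∀ R q, gFind x cur R = some q → q.2.length + 1 = R.length := by
  intro R
  induction R with
  | nil => intro q h; simp [gFind] at h
  | cons r rs ih =>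
    intro q h
    simp only [gFind] at h
    split_ifs at h with h0 h1
    · cases h; simp
    · cases h; simp
    · cases hg : gFind x cur rs with
      | none => rw [hg] at h; simp at h
      | some q' =>
        rw [hg] at h
        simp at h
        have h2 := ih q' hg
        rw [← h]
        simp
        omega

theorem pvScanA_eq (x : List (List Int)) (cur : Int) (C : List (List Int))
    (hC : 0 < C.length) (hcur : (C.getD (C.length - 1) []).getD 1 0 = cur) :
    ∀ (R : List Nat) (S : List (List Int)),
      (∀ s ∈ S, ¬(s.getD 0 0 = cur) ∧ ¬(s.getD 1 0 = cur)) →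
      pvScanA (C ++ (S ++ R.map (pvF x))) (C.length - 1) (C.length + S.length) =
        match gFind x cur R with
        | some q => C ++ q.1 :: (S ++ q.2.map (pvF x))
        | none => C ++ (S ++ R.map (pvF x)) := by
  intro R
  induction R with
  | nil =>
    intro S hS
    rw [pvScanA]
    simp [gFind]
  | cons r rs ih =>
    intro S hS
    have hi1 : C.length - 1 + 1 = C.length := by omega
    have hxi : (C ++ (S ++ (r :: rs).map (pvF x))).getD (C.length - 1) [] =
        C.getD (C.length - 1) [] := pv_getD_append_left _ _ _ (by omega)
    have hxj : (C ++ (S ++ (r :: rs).map (pvF x))).getD (C.length + S.length) [] = pvF x r := by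
      have h1 := pv_getD_append_right C (S ++ (r :: rs).map (pvF x)) S.length
      have h2 := pv_getD_append_right S ((r :: rs).map (pvF x)) 0
      rw [Nat.add_zero] at h2
      rw [h1, h2]
      simp [List.getD]
    have hlen : C.length + S.length < (C ++ (S ++ (r :: rs).map (pvF x))).length := by
      simp only [List.length_append, List.length_map, List.length_cons]
      omega
    rw [pvScanA]
    rw [dif_pos hlen]
    simp only [hxi, hxj, hcur, hi1]
    by_cases h0 : (pvF x r).getD 0 0 = cur
    · have hg : gFind x cur (r :: rs) = some (pvF x r, rs) := by
        simp only [gFind]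
        rw [if_pos h0]
      rw [if_pos h0, hg]
      have he := pv_eraseIdx_mid C S (pvF x r) (rs.map (pvF x))
      simp only [List.map_cons] at *
      rw [he, pv_insertIdx_mid C]
    · by_cases h1 : (pvF x r).getD 1 0 = cur
      · have hg : gFind x cur (r :: rs) = some ((pvF x r).reverse, rs) := by
          simp only [gFind]
          rw [if_neg h0, if_pos h1]
        rw [if_neg h0, if_pos h1, hg]
        have he := pv_eraseIdx_mid C S (pvF x r) (rs.map (pvF x))
        simp only [List.map_cons] at *
        rw [he, pv_insertIdx_mid C]
      · rw [if_neg h0, if_neg h1]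
        have hS' : ∀ s ∈ S ++ [pvF x r], ¬(s.getD 0 0 = cur) ∧ ¬(s.getD 1 0 = cur) := by
          intro s hs
          rcases List.mem_append.1 hs with h | h
          · exact hS s h
          · simp at h; subst h; exact ⟨h0, h1⟩
        have hIH := ih (S ++ [pvF x r]) hS'
        simp only [List.append_assoc, List.singleton_append, List.length_append,
          List.length_singleton, List.map_cons] at hIH ⊢
        have harith : C.length + (S.length + 1) = C.length + S.length + 1 := by omega
        rw [harith] at hIH
        rw [hIH]
        have hg : gFind x cur (r :: rs) = (gFind x cur rs).map (fun q => (q.1, r :: q.2)) := by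
          simp only [gFind]
          rw [if_neg h0, if_neg h1]
        rw [hg]
        cases hgr : gFind x cur rs with
        | none => simp
        | some q' => simp

theorem loopA_eq (x : List (List Int)) :
    ∀ (n : Nat) (R : List Nat) (C : List (List Int)), 0 < C.length → R.length = n →
    (List.range' (C.length - 1) n).foldl (fun xs i => pvScanA xs i (i+1)) (C ++ R.map (pvF x))
      = C ++ gRun x n ((C.getD (C.length - 1) []).getD 1 0) R := by
  intro n
  induction n with
  | zero =>
    intro R C hC hR
    cases R with
    | nil => simp [gRun]
    | cons r rs => simp at hR
  | succ n ih =>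
    intro R C hC hR
    rw [List.range'_succ]
    simp only [List.foldl_cons]
    have hscan := pvScanA_eq x ((C.getD (C.length - 1) []).getD 1 0) C hC rfl R []
      (by intro s hs; simp at hs)
    simp only [List.nil_append, List.length_nil, Nat.add_zero] at hscan
    have hi1 : C.length - 1 + 1 = C.length := by omega
    rw [hi1]
    cases hg : gFind x ((C.getD (C.length - 1) []).getD 1 0) R with
    | some q =>
      have hscan' : pvScanA (C ++ List.map (pvF x) R) (C.length - 1) C.length =
          (C ++ [q.1]) ++ q.2.map (pvF x) := by
        rw [hscan, hg]
        simp
      have hlen : q.2.length = n := by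
        have := gFind_length x _ R q hg
        omega
      have hC' : (C ++ [q.1]).length - 1 = C.length := by simp
      have hcur' : ((C ++ [q.1]).getD C.length []).getD 1 0 = q.1.getD 1 0 := by
        have h := pv_getD_append_right C [q.1] 0
        rw [Nat.add_zero] at h
        rw [h]
        simp [List.getD]
      have hIH := ih q.2 (C ++ [q.1]) (by simp) hlen
      rw [hC', hcur'] at hIH
      have hrun : gRun x (n + 1) ((C.getD (C.length - 1) []).getD 1 0) R =
          q.1 :: gRun x n (q.1.getD 1 0) q.2 := by
        have hg' := hg
        simp only [List.getD_eq_getElem?_getD] at hg'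
        simp [gRun, hg']
      rw [hscan', hIH, hrun]
      simp
    | none =>
      cases R with
      | nil => simp at hR
      | cons r rs =>
        have hscan' : pvScanA (C ++ List.map (pvF x) (r :: rs)) (C.length - 1) C.length =
            (C ++ [pvF x r]) ++ rs.map (pvF x) := by
          rw [hscan, hg]
          simp
        have hlen : rs.length = n := by simp at hR; omega
        have hC' : (C ++ [pvF x r]).length - 1 = C.length := by simp
        have hcur' : ((C ++ [pvF x r]).getD C.length []).getD 1 0 = (pvF x r).getD 1 0 := by
          have h := pv_getD_append_right C [pvF x r] 0
          rw [Nat.add_zero] at h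
          rw [h]
          simp [List.getD]
        have hIH := ih rs (C ++ [pvF x r]) (by simp) hlen
        rw [hC', hcur'] at hIH
        have hrun : gRun x (n + 1) ((C.getD (C.length - 1) []).getD 1 0) (r :: rs) =
            pvF x r :: gRun x n ((pvF x r).getD 1 0) rs := by
          have hg' := hg
          simp only [List.getD_eq_getElem?_getD] at hg'
          simp [gRun, hg']
        rw [hscan', hIH, hrun]
        simp

theorem pv_self_decomp (x : List (List Int)) :
    x = (List.range' 0 x.length).map (pvF x) := by
  apply List.ext_getElem
  · simp
  · intro i h1 h2
    simp [pvF, List.getD, List.getElem?_eq_getElem h1]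

theorem a_eq_g (x : List (List Int)) : sortSimplex2D x = gTop x := by
  by_cases hle : x.length ≤ 1
  · have h0 : x.length - 1 = 0 := by omega
    unfold sortSimplex2D gTop
    rw [h0, if_pos hle]
    simp
  · have hn : 2 ≤ x.length := by omega
    have hdecomp : x = [pvF x 0] ++ (List.range' 1 (x.length - 1)).map (pvF x) := by
      conv_lhs => rw [pv_self_decomp x]
      have : List.range' 0 x.length = List.range' 0 1 ++ List.range' 1 (x.length - 1) := by
        rw [List.range'_append]
        congr 1
        omega
      rw [this]
      simp
    unfold sortSimplex2D gTop
    rw [if_neg hle]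
    rw [List.range_eq_range']
    have hloop := loopA_eq x (x.length - 1) (List.range' 1 (x.length - 1)) [pvF x 0]
      (by simp) (by simp)
    simp only [List.length_singleton, Nat.sub_self] at hloop
    have hgd : (([pvF x 0] : List (List Int)).getD 0 []).getD 1 0 = (pvF x 0).getD 1 0 := by
      simp [List.getD]
    rw [hgd] at hloop
    conv_lhs => rw [hdecomp]
    have hlen2 : ([pvF x 0] ++ (List.range' 1 (x.length - 1)).map (pvF x)).length = x.length := by
      simp
      omega
    rw [hlen2, hloop]
    simp

-- ===== B side =====
def pvQ0 (x : List (List Int)) (v : Int) (r : Nat) : Bool := pvKey0 (pvF x r) == v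
def pvQ1 (x : List (List Int)) (v : Int) (r : Nat) : Bool := pvKey1 (pvF x r) == v

-- the loop invariant tying B's state to the reference remaining-index list R
def InvB (x : List (List Int)) (smap emap : PySem.Dict Int (List Nat))
    (alive : List Bool) (p : Nat) (R : List Nat) : Prop :=
  alive.length = x.length ∧
  (∀ v, smap.getD v [] = R.filter (pvQ0 x v)) ∧
  (∀ v, emap.getD v [] = R.filter (pvQ1 x v)) ∧
  (∀ r, r < x.length → alive.getD r false = decide (r ∈ R)) ∧
  R.Pairwise (· < ·) ∧
  (∀ r ∈ R, r < x.length) ∧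
  (∀ q, q < p → q ∉ R)

theorem pv_filter_erase (l : List Nat) (q : Nat → Bool) (j : Nat) (hq : q j = true) :
    (l.erase j).filter q = (l.filter q).erase j := by
  induction l with
  | nil => simp
  | cons a t ih =>
    by_cases ha : a = j
    · subst ha
      rw [List.erase_cons_head, List.filter_cons_of_pos hq, List.erase_cons_head]
    · rw [List.erase_cons_tail (by simp [ha])]
      by_cases hqa : q a = true
      · rw [List.filter_cons_of_pos hqa, List.filter_cons_of_pos hqa,
          List.erase_cons_tail (by simp [ha]), ih]
      · rw [List.filter_cons_of_neg (by simpa using hqa),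
          List.filter_cons_of_neg (by simpa using hqa), ih]

theorem pv_filter_erase_neg (l : List Nat) (q : Nat → Bool) (j : Nat) (hq : q j = false) :
    (l.erase j).filter q = l.filter q := by
  induction l with
  | nil => simp
  | cons a t ih =>
    by_cases ha : a = j
    · subst ha
      rw [List.erase_cons_head, List.filter_cons_of_neg (by simp [hq])]
    · rw [List.erase_cons_tail (by simp [ha])]
      by_cases hqa : q a = true
      · rw [List.filter_cons_of_pos hqa, List.filter_cons_of_pos hqa, ih]
      · rw [List.filter_cons_of_neg (by simpa using hqa),
          List.filter_cons_of_neg (by simpa using hqa), ih]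

-- consuming an element j ∈ R preserves the invariant with R.erase j
theorem InvB_consume (x : List (List Int)) (smap emap : PySem.Dict Int (List Nat))
    (alive : List Bool) (p p' : Nat) (R : List Nat) (j : Nat)
    (hInv : InvB x smap emap alive p R) (hj : j ∈ R)
    (hp' : ∀ q, q < p' → q ∉ R.erase j) :
    InvB x (pvConsume x j smap emap).1 (pvConsume x j smap emap).2
      (alive.set j false) p' (R.erase j) := by
  obtain ⟨hlen, hs, he, ha, hsort, hbnd, hp⟩ := hInv
  have hnd : R.Nodup := hsort.nodup
  refine ⟨by simp [hlen], ?_, ?_, ?_, ?_, ?_, hp'⟩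
  · intro v
    unfold pvConsume
    simp only
    rw [PySem.Dict.getD_modify]
    by_cases hv : v = pvKey0 (x.getD j [])
    · subst hv
      rw [if_pos rfl]
      have hq : pvQ0 x (pvKey0 (x.getD j [])) j = true := by simp [pvQ0, pvF]
      have hmem : j ∈ R.filter (pvQ0 x (pvKey0 (x.getD j []))) := List.mem_filter.2 ⟨hj, hq⟩
      rw [hs]
      unfold pvRemoveIdx
      rw [PySem.List.remove?_eq_some_erase _ j hmem]
      exact (pv_filter_erase R _ j hq).symm
    · rw [if_neg hv]
      rw [hs v, pv_filter_erase_neg]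
      simp only [pvQ0, pvF]
      rw [beq_eq_false_iff_ne]
      exact fun h => hv h.symm
  · intro v
    unfold pvConsume
    simp only
    rw [PySem.Dict.getD_modify]
    by_cases hv : v = pvKey1 (x.getD j [])
    · subst hv
      rw [if_pos rfl]
      have hq : pvQ1 x (pvKey1 (x.getD j [])) j = true := by simp [pvQ1, pvF]
      have hmem : j ∈ R.filter (pvQ1 x (pvKey1 (x.getD j []))) := List.mem_filter.2 ⟨hj, hq⟩
      rw [he]
      unfold pvRemoveIdx
      rw [PySem.List.remove?_eq_some_erase _ j hmem]
      exact (pv_filter_erase R _ j hq).symm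
    · rw [if_neg hv]
      rw [he v, pv_filter_erase_neg]
      simp only [pvQ1, pvF]
      rw [beq_eq_false_iff_ne]
      exact fun h => hv h.symm
  · intro r hr
    have hj' : j < alive.length := hlen ▸ hbnd j hj
    by_cases hrj : r = j
    · subst hrj
      have : (alive.set r false).getD r false = false := by
        simp [List.getD, hj']
      rw [this]
      have : r ∉ R.erase r := fun h => ((hnd.mem_erase_iff.1 h).1 rfl)
      simp [this]
    · have : (alive.set j false).getD r false = alive.getD r false := by
        simp only [List.getD, List.getElem?_set]
        rw [if_neg (fun h => hrj h.symm)]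
      rw [this, ha r hr]
      congr 1
      simp only [eq_iff_iff]
      constructor
      · intro h; exact (hnd.mem_erase_iff.2 ⟨hrj, h⟩)
      · intro h; exact (hnd.mem_erase_iff.1 h).2
  · exact hsort.sublist List.erase_sublist
  · intro r hr
    exact hbnd r (List.Sublist.mem hr List.erase_sublist)

-- pvFindAlive finds the first alive index at or after p
theorem pvFindAlive_eq : ∀ (k : Nat) (alive : List Bool) (r p : Nat), r - p = k → p ≤ r →
    r < alive.length → alive.getD r false = true →
    (∀ q, p ≤ q → q < r → alive.getD q false = false) →
    pvFindAlive alive p = r := by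
  intro k
  induction k with
  | zero =>
    intro alive r p hk hpr hrl har hq
    have : p = r := by omega
    subst this
    rw [pvFindAlive]
    rw [dif_pos (by omega)]
    rw [if_pos har]
  | succ k ih =>
    intro alive r p hk hpr hrl har hq
    have hpr' : p < r := by omega
    have hap : alive.getD p false = false := hq p le_rfl hpr'
    rw [pvFindAlive]
    rw [dif_pos (by omega)]
    rw [hap]
    simp only [Bool.false_eq_true, if_false]
    exact ih alive r (p+1) (by omega) (by omega) hrl har (fun q h1 h2 => hq q (by omega) h2)

-- head of a sorted filter is the least matching element
theorem pv_filter_head_min (R : List Nat) (q : Nat → Bool) (j : Nat) (l : List Nat)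
    (hsort : R.Pairwise (· < ·)) (h : R.filter q = j :: l) :
    ∀ r ∈ R, q r = true → j ≤ r := by
  induction R with
  | nil => simp at h
  | cons a t ih =>
    rcases List.pairwise_cons.1 hsort with ⟨hlt, hsort'⟩
    by_cases hqa : q a = true
    · rw [List.filter_cons_of_pos hqa] at h
      injection h with h1 h2
      subst h1
      intro r hr hqr
      rcases List.mem_cons.1 hr with h | h
      · omega
      · exact Nat.le_of_lt (hlt r h)
    · rw [List.filter_cons_of_neg (by simpa using hqa)] at h
      intro r hr hqr
      rcases List.mem_cons.1 hr with h' | h'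
      · subst h'; simp [hqr] at hqa
      · exact ih hsort' h r h' hqr

theorem pv_filter_head_mem (R : List Nat) (q : Nat → Bool) (j : Nat) (l : List Nat)
    (h : R.filter q = j :: l) : j ∈ R ∧ q j = true := by
  have : j ∈ R.filter q := by rw [h]; exact List.mem_cons_self
  exact ⟨(List.mem_filter.1 this).1, (List.mem_filter.1 this).2⟩

-- gFind from the two filters
theorem gFind_none_of_filters (x : List (List Int)) (cur : Int) (R : List Nat)
    (h0 : R.filter (pvQ0 x cur) = []) (h1 : R.filter (pvQ1 x cur) = []) :
    gFind x cur R = none := by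
  induction R with
  | nil => simp [gFind]
  | cons r rs ih =>
    have hq0 : pvQ0 x cur r = false := by
      by_cases hq : pvQ0 x cur r = true
      · rw [List.filter_cons_of_pos hq] at h0; simp at h0
      · simpa using hq
    have hq1 : pvQ1 x cur r = false := by
      by_cases hq : pvQ1 x cur r = true
      · rw [List.filter_cons_of_pos hq] at h1; simp at h1
      · simpa using hq
    rw [List.filter_cons_of_neg (by simp [hq0])] at h0
    rw [List.filter_cons_of_neg (by simp [hq1])] at h1
    simp only [gFind]
    rw [if_neg (by simpa [pvQ0, pvKey0] using hq0), if_neg (by simpa [pvQ1, pvKey1] using hq1)]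
    rw [ih h0 h1]
    rfl

theorem gFind_start_of_filters (x : List (List Int)) (cur : Int) (R : List Nat) (js : Nat)
    (hsort : R.Pairwise (· < ·))
    (hmem : js ∈ R) (hq : pvQ0 x cur js = true)
    (hmin : ∀ r ∈ R, (pvQ0 x cur r = true ∨ pvQ1 x cur r = true) → js ≤ r) :
    gFind x cur R = some (pvF x js, R.erase js) := by
  induction R with
  | nil => simp at hmem
  | cons r rs ih =>
    rcases List.pairwise_cons.1 hsort with ⟨hlt, hsort'⟩
    by_cases hrj : r = js
    · subst hrj
      simp only [gFind]
      rw [if_pos (by simpa [pvQ0, pvKey0] using hq)]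
      rw [List.erase_cons_head]
    · have hjs_rs : js ∈ rs := by
        rcases List.mem_cons.1 hmem with h | h
        · exact absurd h.symm hrj
        · exact h
      have hrlt : r < js := hlt js hjs_rs
      have hq0r : pvQ0 x cur r = false := by
        by_cases hq' : pvQ0 x cur r = true
        · have := hmin r List.mem_cons_self (Or.inl hq')
          omega
        · simpa using hq'
      have hq1r : pvQ1 x cur r = false := by
        by_cases hq' : pvQ1 x cur r = true
        · have := hmin r List.mem_cons_self (Or.inr hq')
          omega
        · simpa using hq'
      simp only [gFind]
      rw [if_neg (by simpa [pvQ0, pvKey0] using hq0r),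
        if_neg (by simpa [pvQ1, pvKey1] using hq1r)]
      rw [ih hsort' hjs_rs (fun r' hr' h' => hmin r' (List.mem_cons_of_mem _ hr') h')]
      rw [List.erase_cons_tail (by simpa using hrj)]
      rfl

theorem gFind_end_of_filters (x : List (List Int)) (cur : Int) (R : List Nat) (je : Nat)
    (hsort : R.Pairwise (· < ·))
    (hmem : je ∈ R) (hq : pvQ1 x cur je = true) (hq0je : pvQ0 x cur je = false)
    (hmin : ∀ r ∈ R, (pvQ0 x cur r = true ∨ pvQ1 x cur r = true) → je ≤ r) :
    gFind x cur R = some ((pvF x je).reverse, R.erase je) := by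
  induction R with
  | nil => simp at hmem
  | cons r rs ih =>
    rcases List.pairwise_cons.1 hsort with ⟨hlt, hsort'⟩
    by_cases hrj : r = je
    · subst hrj
      simp only [gFind]
      rw [if_neg (by simpa [pvQ0, pvKey0] using hq0je),
        if_pos (by simpa [pvQ1, pvKey1] using hq)]
      rw [List.erase_cons_head]
    · have hje_rs : je ∈ rs := by
        rcases List.mem_cons.1 hmem with h | h
        · exact absurd h.symm hrj
        · exact h
      have hrlt : r < je := hlt je hje_rs
      have hq0r : pvQ0 x cur r = false := by
        by_cases hq' : pvQ0 x cur r = true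
        · have := hmin r List.mem_cons_self (Or.inl hq')
          omega
        · simpa using hq'
      have hq1r : pvQ1 x cur r = false := by
        by_cases hq' : pvQ1 x cur r = true
        · have := hmin r List.mem_cons_self (Or.inr hq')
          omega
        · simpa using hq'
      simp only [gFind]
      rw [if_neg (by simpa [pvQ0, pvKey0] using hq0r),
        if_neg (by simpa [pvQ1, pvKey1] using hq1r)]
      rw [ih hsort' hje_rs (fun r' hr' h' => hmin r' (List.mem_cons_of_mem _ hr') h')]
      rw [List.erase_cons_tail (by simpa using hrj)]
      rfl

theorem loopB_eq (x : List (List Int)) :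
    ∀ (n : Nat) (smap emap : PySem.Dict Int (List Nat)) (alive : List Bool)
      (p : Nat) (cur : Int) (out : List (List Int)) (R : List Nat),
      InvB x smap emap alive p R → R.length = n →
      pvLoopB x n smap emap alive p cur out = out ++ gRun x n cur R := by
  intro n
  induction n with
  | zero => intro smap emap alive p cur out R hInv hR; simp [pvLoopB, gRun]
  | succ n ih =>
    intro smap emap alive p cur out R hInv hR
    obtain ⟨hlen, hs, he, ha, hsort, hbnd, hp⟩ := hInv
    cases R with
    | nil => simp at hR
    | cons r rs =>
      have hnd : (r :: rs).Nodup := hsort.nodup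
      have hltall : ∀ a ∈ rs, r < a := (List.pairwise_cons.1 hsort).1
      cases hcs : (r :: rs).filter (pvQ0 x cur) with
      | nil =>
        cases hce : (r :: rs).filter (pvQ1 x cur) with
        | nil =>
          -- no match: fall back to the smallest alive index, which is r
          have hfa : pvFindAlive alive p = r := by
            apply pvFindAlive_eq (r - p) alive r p rfl
            · by_contra h
              exact hp r (by omega) List.mem_cons_self
            · rw [hlen]; exact hbnd r List.mem_cons_self
            · rw [ha r (hbnd r List.mem_cons_self)]
              simp
            · intro q h1 h2
              have hq : q ∉ (r :: rs) := by
                intro hqm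
                rcases List.mem_cons.1 hqm with h' | h'
                · omega
                · have := hltall q h'; omega
              rw [ha q (by have := hbnd r List.mem_cons_self; omega)]
              simpa using hq
          have hstep : pvLoopB x (n+1) smap emap alive p cur out =
              pvLoopB x n (pvConsume x r smap emap).1 (pvConsume x r smap emap).2
                (alive.set r false) r ((x.getD r []).getD 1 0) (out ++ [x.getD r []]) := by
            simp only [pvLoopB, hs, he, hcs, hce, hfa]
          have hInv' := InvB_consume x smap emap alive p r (r :: rs) r
            ⟨hlen, hs, he, ha, hsort, hbnd, hp⟩ List.mem_cons_self
            (by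
              rw [List.erase_cons_head]
              intro q h1 hqm
              have := hltall q hqm; omega)
          rw [List.erase_cons_head] at hInv'
          have hIH := ih (pvConsume x r smap emap).1 (pvConsume x r smap emap).2
            (alive.set r false) r ((x.getD r []).getD 1 0) (out ++ [x.getD r []]) rs hInv'
            (by simp at hR; omega)
          have hgf : gFind x cur (r :: rs) = none :=
            gFind_none_of_filters x cur (r :: rs) hcs hce
          have hrun : gRun x (n+1) cur (r :: rs) =
              pvF x r :: gRun x n ((pvF x r).getD 1 0) rs := by
            simp [gRun, hgf]
          rw [hstep, hIH, hrun]
          simp [pvF]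
        | cons je m =>
          -- end-match only
          have hjemem := pv_filter_head_mem (r :: rs) (pvQ1 x cur) je m hce
          have hjemin := pv_filter_head_min (r :: rs) (pvQ1 x cur) je m hsort hce
          have hq0je : pvQ0 x cur je = false := by
            by_cases h : pvQ0 x cur je = true
            · have : je ∈ (r :: rs).filter (pvQ0 x cur) := List.mem_filter.2 ⟨hjemem.1, h⟩
              rw [hcs] at this; simp at this
            · simpa using h
          have hmin : ∀ r' ∈ (r :: rs), (pvQ0 x cur r' = true ∨ pvQ1 x cur r' = true) → je ≤ r' := by
            intro r' hr' h'
            rcases h' with h' | h'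
            · have : r' ∈ (r :: rs).filter (pvQ0 x cur) := List.mem_filter.2 ⟨hr', h'⟩
              rw [hcs] at this; simp at this
            · exact hjemin r' hr' h'
          have hgf := gFind_end_of_filters x cur (r :: rs) je hsort hjemem.1 hjemem.2 hq0je hmin
          have hstep : pvLoopB x (n+1) smap emap alive p cur out =
              pvLoopB x n (pvConsume x je smap emap).1 (pvConsume x je smap emap).2
                (alive.set je false) p (((x.getD je []).reverse).getD 1 0)
                (out ++ [(x.getD je []).reverse]) := by
            simp only [pvLoopB, hs, he, hcs, hce]
          have hInv' := InvB_consume x smap emap alive p p (r :: rs) je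
            ⟨hlen, hs, he, ha, hsort, hbnd, hp⟩ hjemem.1
            (fun q h1 hqm => hp q h1 (List.Sublist.mem hqm List.erase_sublist))
          have hIH := ih (pvConsume x je smap emap).1 (pvConsume x je smap emap).2
            (alive.set je false) p (((x.getD je []).reverse).getD 1 0)
            (out ++ [(x.getD je []).reverse]) ((r :: rs).erase je) hInv'
            (by rw [List.length_erase_of_mem hjemem.1]; simp at hR ⊢; omega)
          have hrun : gRun x (n+1) cur (r :: rs) =
              (pvF x je).reverse :: gRun x n (((pvF x je).reverse).getD 1 0) ((r :: rs).erase je) := by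
            simp [gRun, hgf]
          rw [hstep, hIH, hrun]
          simp [pvF]
      | cons js l =>
        have hjsmem := pv_filter_head_mem (r :: rs) (pvQ0 x cur) js l hcs
        have hjsmin := pv_filter_head_min (r :: rs) (pvQ0 x cur) js l hsort hcs
        cases hce : (r :: rs).filter (pvQ1 x cur) with
        | nil =>
          have hmin : ∀ r' ∈ (r :: rs), (pvQ0 x cur r' = true ∨ pvQ1 x cur r' = true) → js ≤ r' := by
            intro r' hr' h'
            rcases h' with h' | h'
            · exact hjsmin r' hr' h'
            · have : r' ∈ (r :: rs).filter (pvQ1 x cur) := List.mem_filter.2 ⟨hr', h'⟩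
              rw [hce] at this; simp at this
          have hgf := gFind_start_of_filters x cur (r :: rs) js hsort hjsmem.1 hjsmem.2 hmin
          have hstep : pvLoopB x (n+1) smap emap alive p cur out =
              pvLoopB x n (pvConsume x js smap emap).1 (pvConsume x js smap emap).2
                (alive.set js false) p ((x.getD js []).getD 1 0) (out ++ [x.getD js []]) := by
            simp only [pvLoopB, hs, he, hcs, hce]
          have hInv' := InvB_consume x smap emap alive p p (r :: rs) js
            ⟨hlen, hs, he, ha, hsort, hbnd, hp⟩ hjsmem.1
            (fun q h1 hqm => hp q h1 (List.Sublist.mem hqm List.erase_sublist))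
          have hIH := ih (pvConsume x js smap emap).1 (pvConsume x js smap emap).2
            (alive.set js false) p ((x.getD js []).getD 1 0)
            (out ++ [x.getD js []]) ((r :: rs).erase js) hInv'
            (by rw [List.length_erase_of_mem hjsmem.1]; simp at hR ⊢; omega)
          have hrun : gRun x (n+1) cur (r :: rs) =
              pvF x js :: gRun x n ((pvF x js).getD 1 0) ((r :: rs).erase js) := by
            simp [gRun, hgf]
          rw [hstep, hIH, hrun]
          simp [pvF]
        | cons je m =>
          have hjemem := pv_filter_head_mem (r :: rs) (pvQ1 x cur) je m hce
          have hjemin := pv_filter_head_min (r :: rs) (pvQ1 x cur) je m hsort hce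
          by_cases hle : js ≤ je
          · have hmin : ∀ r' ∈ (r :: rs), (pvQ0 x cur r' = true ∨ pvQ1 x cur r' = true) → js ≤ r' := by
              intro r' hr' h'
              rcases h' with h' | h'
              · exact hjsmin r' hr' h'
              · have := hjemin r' hr' h'; omega
            have hgf := gFind_start_of_filters x cur (r :: rs) js hsort hjsmem.1 hjsmem.2 hmin
            have hstep : pvLoopB x (n+1) smap emap alive p cur out =
                pvLoopB x n (pvConsume x js smap emap).1 (pvConsume x js smap emap).2
                  (alive.set js false) p ((x.getD js []).getD 1 0) (out ++ [x.getD js []]) := by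
              simp only [pvLoopB, hs, he, hcs, hce, if_pos hle]
            have hInv' := InvB_consume x smap emap alive p p (r :: rs) js
              ⟨hlen, hs, he, ha, hsort, hbnd, hp⟩ hjsmem.1
              (fun q h1 hqm => hp q h1 (List.Sublist.mem hqm List.erase_sublist))
            have hIH := ih (pvConsume x js smap emap).1 (pvConsume x js smap emap).2
              (alive.set js false) p ((x.getD js []).getD 1 0)
              (out ++ [x.getD js []]) ((r :: rs).erase js) hInv'
              (by rw [List.length_erase_of_mem hjsmem.1]; simp at hR ⊢; omega)
            have hrun : gRun x (n+1) cur (r :: rs) =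
                pvF x js :: gRun x n ((pvF x js).getD 1 0) ((r :: rs).erase js) := by
              simp [gRun, hgf]
            rw [hstep, hIH, hrun]
            simp [pvF]
          · have hjelt : je < js := by omega
            have hq0je : pvQ0 x cur je = false := by
              by_cases h : pvQ0 x cur je = true
              · have := hjsmin je hjemem.1 h; omega
              · simpa using h
            have hmin : ∀ r' ∈ (r :: rs), (pvQ0 x cur r' = true ∨ pvQ1 x cur r' = true) → je ≤ r' := by
              intro r' hr' h'
              rcases h' with h' | h'
              · have := hjsmin r' hr' h'; omega
              · exact hjemin r' hr' h'
            have hgf := gFind_end_of_filters x cur (r :: rs) je hsort hjemem.1 hjemem.2 hq0je hmin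
            have hstep : pvLoopB x (n+1) smap emap alive p cur out =
                pvLoopB x n (pvConsume x je smap emap).1 (pvConsume x je smap emap).2
                  (alive.set je false) p (((x.getD je []).reverse).getD 1 0)
                  (out ++ [(x.getD je []).reverse]) := by
              simp only [pvLoopB, hs, he, hcs, hce, if_neg hle]
            have hInv' := InvB_consume x smap emap alive p p (r :: rs) je
              ⟨hlen, hs, he, ha, hsort, hbnd, hp⟩ hjemem.1
              (fun q h1 hqm => hp q h1 (List.Sublist.mem hqm List.erase_sublist))
            have hIH := ih (pvConsume x je smap emap).1 (pvConsume x je smap emap).2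
              (alive.set je false) p (((x.getD je []).reverse).getD 1 0)
              (out ++ [(x.getD je []).reverse]) ((r :: rs).erase je) hInv'
              (by rw [List.length_erase_of_mem hjemem.1]; simp at hR ⊢; omega)
            have hrun : gRun x (n+1) cur (r :: rs) =
                (pvF x je).reverse :: gRun x n (((pvF x je).reverse).getD 1 0) ((r :: rs).erase je) := by
              simp [gRun, hgf]
            rw [hstep, hIH, hrun]
            simp [pvF]

-- the combined two-dict build loop splits componentwise
theorem pv_foldl_pair :
    ∀ (l : List (List Int × Nat)) (d1 d2 : PySem.Dict Int (List Nat)),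
      l.foldl (fun ms p => (ms.1.modify (pvKey0 p.1) [] (· ++ [p.2]),
                            ms.2.modify (pvKey1 p.1) [] (· ++ [p.2]))) (d1, d2)
        = (l.foldl (fun d p => d.modify (pvKey0 p.1) [] (· ++ [p.2])) d1,
           l.foldl (fun d p => d.modify (pvKey1 p.1) [] (· ++ [p.2])) d2) := by
  intro l
  induction l with
  | nil => intro d1 d2; rfl
  | cons a t ih => intro d1 d2; simp only [List.foldl_cons]; exact ih _ _

-- a filter on indices of zipIdx is a filter of range'
theorem pv_zipIdx_filter_snd (q : Nat → Bool) :
    ∀ (l : List (List Int)) (k : Nat),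
      ((l.zipIdx k).filter (fun p => q p.2)).map (·.2) = (List.range' k l.length).filter q := by
  intro l
  induction l with
  | nil => intro k; simp
  | cons a t ih =>
    intro k
    rw [List.zipIdx_cons]
    simp only [List.length_cons, List.range'_succ]
    by_cases hq : q k = true
    · rw [List.filter_cons_of_pos hq, List.filter_cons_of_pos (by simpa using hq)]
      simp only [List.map_cons]
      rw [ih (k+1)]
    · rw [List.filter_cons_of_neg (by simpa using hq), List.filter_cons_of_neg (by simpa using hq)]
      rw [ih (k+1)]

theorem pv_build_fst (x : List (List Int)) (v : Int) :
    (pvBuild x).1.getD v [] = (List.range' 0 x.length).filter (pvQ0 x v) := by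
  unfold pvBuild
  rw [pv_foldl_pair]
  simp only
  have hmap : x.zipIdx.foldl (fun d (p : List Int × Nat) => d.modify (pvKey0 p.1) [] (· ++ [p.2]))
      PySem.Dict.empty =
      (x.zipIdx.map (fun p => (pvKey0 p.1, p.2))).foldl
        (fun d (p : Int × Nat) => d.modify p.1 [] (· ++ [p.2])) PySem.Dict.empty := by
    rw [List.foldl_map]
  rw [hmap, PySem.Dict.getD_foldl_modify_append]
  rw [PySem.Dict.getD_empty, List.nil_append]
  rw [List.filter_map, List.map_map]
  have hfun : ((fun x : Int × Nat => x.2) ∘ (fun p : List Int × Nat => (pvKey0 p.1, p.2))) =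
      (fun p : List Int × Nat => p.2) := rfl
  rw [hfun]
  have hcong : x.zipIdx.filter ((fun p : Int × Nat => p.1 == v) ∘ (fun p => (pvKey0 p.1, p.2))) =
      x.zipIdx.filter (fun p => pvQ0 x v p.2) := by
    apply List.filter_congr
    intro p hp
    obtain ⟨h1, h2, h3⟩ := List.mem_zipIdx (xs := x) (k := 0) (x := p.1) (i := p.2) (by simpa using hp)
    simp only [Function.comp, pvQ0, pvF]
    congr 1
    rw [h3]
    simp [List.getD, List.getElem?_eq_getElem (show p.2 < x.length by omega)]
  rw [hcong]
  have := pv_zipIdx_filter_snd (pvQ0 x v) x 0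
  simpa using this

theorem pv_build_snd (x : List (List Int)) (v : Int) :
    (pvBuild x).2.getD v [] = (List.range' 0 x.length).filter (pvQ1 x v) := by
  unfold pvBuild
  rw [pv_foldl_pair]
  simp only
  have hmap : x.zipIdx.foldl (fun d (p : List Int × Nat) => d.modify (pvKey1 p.1) [] (· ++ [p.2]))
      PySem.Dict.empty =
      (x.zipIdx.map (fun p => (pvKey1 p.1, p.2))).foldl
        (fun d (p : Int × Nat) => d.modify p.1 [] (· ++ [p.2])) PySem.Dict.empty := by
    rw [List.foldl_map]
  rw [hmap, PySem.Dict.getD_foldl_modify_append]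
  rw [PySem.Dict.getD_empty, List.nil_append]
  rw [List.filter_map, List.map_map]
  have hfun : ((fun x : Int × Nat => x.2) ∘ (fun p : List Int × Nat => (pvKey1 p.1, p.2))) =
      (fun p : List Int × Nat => p.2) := rfl
  rw [hfun]
  have hcong : x.zipIdx.filter ((fun p : Int × Nat => p.1 == v) ∘ (fun p => (pvKey1 p.1, p.2))) =
      x.zipIdx.filter (fun p => pvQ1 x v p.2) := by
    apply List.filter_congr
    intro p hp
    obtain ⟨h1, h2, h3⟩ := List.mem_zipIdx (xs := x) (k := 0) (x := p.1) (i := p.2) (by simpa using hp)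
    simp only [Function.comp, pvQ1, pvF]
    congr 1
    rw [h3]
    simp [List.getD, List.getElem?_eq_getElem (show p.2 < x.length by omega)]
  rw [hcong]
  have := pv_zipIdx_filter_snd (pvQ1 x v) x 0
  simpa using this

theorem InvB_init (x : List (List Int)) :
    InvB x (pvBuild x).1 (pvBuild x).2 (List.replicate x.length true) 0 (List.range' 0 x.length) := by
  refine ⟨by simp, pv_build_fst x, pv_build_snd x, ?_, ?_, ?_, by omega⟩
  · intro r hr
    have h1 : (List.replicate x.length true).getD r false = true := by
      simp [List.getD, hr]
    rw [h1]
    have : r ∈ List.range' 0 x.length := by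
      simp [List.mem_range']
      omega
    simp [this]
  · have := List.pairwise_lt_range (n := x.length)
    rwa [List.range_eq_range'] at this
  · intro r hr
    have := List.mem_range'_1.1 hr
    omega

theorem b_eq_g (x : List (List Int)) : sortSimplex2D_alt x = gTop x := by
  by_cases hle : x.length ≤ 1
  · unfold sortSimplex2D_alt gTop
    rw [if_pos hle, if_pos hle]
  · have hn : 2 ≤ x.length := by omega
    have h0mem : 0 ∈ List.range' 0 x.length := by
      simp [List.mem_range']
      omega
    have hInv' := InvB_consume x (pvBuild x).1 (pvBuild x).2 (List.replicate x.length true)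
      0 0 (List.range' 0 x.length) 0 (InvB_init x) h0mem (by omega)
    have hR : (List.range' 0 x.length).erase 0 = List.range' 1 (x.length - 1) := by
      have : List.range' 0 x.length = 0 :: List.range' 1 (x.length - 1) := by
        have h1 : x.length = (x.length - 1) + 1 := by omega
        conv_lhs => rw [h1, List.range'_succ]
      rw [this, List.erase_cons_head]
    rw [hR] at hInv'
    have hloop := loopB_eq x (x.length - 1) (pvConsume x 0 (pvBuild x).1 (pvBuild x).2).1
      (pvConsume x 0 (pvBuild x).1 (pvBuild x).2).2
      ((List.replicate x.length true).set 0 false) 0 ((x.getD 0 []).getD 1 0)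
      [x.getD 0 []] (List.range' 1 (x.length - 1)) hInv' (by simp)
    unfold sortSimplex2D_alt gTop
    rw [if_neg hle, if_neg hle]
    simp only
    rw [hloop]
    simp [pvF]


-- ===== VERDICT (by name: the statement is the Claim_ definition above) =====
theorem sortSimplex2D_spec : Claim_equal_sortSimplex2D := by
  intro x _ _
  unfold Spec_sortSimplex2D
  rw [a_eq_g, b_eq_g]
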